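-- pv_equiv track=rewrite | github.com/FsterThanLight/Automated_office | 代表处日报/functions.py | casting_classification
-- ===== SOURCE A (Python) =====
-- def casting_classification(beam_info):
--     '''将已浇筑的梁片信息进行分类'''
--     if len(beam_info)==0:
--         pass
--     else:
--         casted_info=[]
--         be_12_25=[]
--         be_12_40=[]
--         be_13_25=[]
--         be_13_40=[]
--         be_14_25=[]
--         be_14_40=[]
--         be_15_25=[]
--         be_15_40=[]
--         for i in range(len(beam_info)):
--             if beam_info[i][3]=='25m' and beam_info[i][4]=='ZCB1-12':
--                 be_12_25.append(beam_info[i])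
--             elif beam_info[i][3]=='40m' and beam_info[i][4]=='ZCB1-12':
--                 be_12_40.append(beam_info[i])
--             elif beam_info[i][3]=='25m' and beam_info[i][4]=='ZCB1-13':
--                 be_13_25.append(beam_info[i])
--             elif beam_info[i][3]=='40m' and beam_info[i][4]=='ZCB1-13':
--                 be_13_40.append(beam_info[i])
--             elif beam_info[i][3]=='25m' and beam_info[i][4]=='ZCB1-14':
--                 be_14_25.append(beam_info[i])
--             elif beam_info[i][3]=='40m' and beam_info[i][4]=='ZCB1-14':
--                 be_14_40.append(beam_info[i])
--             elif beam_info[i][3]=='25m' and beam_info[i][4]=='ZCB1-15':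
--                 be_15_25.append(beam_info[i])
--             elif beam_info[i][3]=='40m' and beam_info[i][4]=='ZCB1-15':
--                 be_15_40.append(beam_info[i])
--         casted_info=[len(be_12_25),len(be_12_40),len(be_13_25),len(be_13_40),\
--             len(be_14_25),len(be_14_40),len(be_15_25),len(be_15_40)]
--         return casted_info
-- ===== SOURCE B (Python) =====
-- def casting_classification(beam_info):
--     '''将已浇筑的梁片信息进行分类'''
--     if len(beam_info) == 0:
--         return None
--     keys = [(b[3], b[4]) if b[3] in ('25m', '40m') else None for b in beam_info]
--     return [keys.count((length, btype))
--             for btype in ('ZCB1-12', 'ZCB1-13', 'ZCB1-14', 'ZCB1-15')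
--             for length in ('25m', '40m')]
-- ===== Notes on version B (the rewrite author's own statement) =====
-- stated objective: simpler
-- what changed: Replaces the eight accumulator lists and the 8-way if/elif dispatch by two stages: first project every row to its (length, type) key (None for other lengths), then produce the result as keys.count over the eight categories generated by a nested comprehension over types and lengths.
import Mathlib
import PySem

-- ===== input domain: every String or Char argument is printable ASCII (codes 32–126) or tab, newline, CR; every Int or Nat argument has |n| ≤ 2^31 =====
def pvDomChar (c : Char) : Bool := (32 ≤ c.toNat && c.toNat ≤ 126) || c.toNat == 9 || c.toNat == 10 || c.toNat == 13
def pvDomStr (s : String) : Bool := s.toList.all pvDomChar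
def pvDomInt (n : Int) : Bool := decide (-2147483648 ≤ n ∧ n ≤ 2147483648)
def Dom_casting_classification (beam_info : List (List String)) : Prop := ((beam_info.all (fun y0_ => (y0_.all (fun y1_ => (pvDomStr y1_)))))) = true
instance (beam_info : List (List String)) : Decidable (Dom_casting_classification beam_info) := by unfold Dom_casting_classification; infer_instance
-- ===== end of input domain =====

-- B replaces A's eight accumulator lists and 8-way if/elif dispatch by two stages: project each row to its (length, type) key, then count the eight categories (objective: simpler).
-- ===== PORT A =====
-- the eight accumulator lists be_12_25 … be_15_40, in A's output order
def pvAcc8 : Type := List (List String) × List (List String) × List (List String) × List (List String) × List (List String) × List (List String) × List (List String) × List (List String)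

-- A's for-loop: indexes row[3] (and, when row[3] is '25m'/'40m', row[4]); none = IndexError
def pvALoop : List (List String) → pvAcc8 → Option pvAcc8
  | [], acc => some acc
  | row :: rest, (t1, t2, t3, t4, t5, t6, t7, t8) =>
    match PySem.List.pyGet? row 3 with
    | none => none
    | some s3 =>
      if s3 == "25m" then
        match PySem.List.pyGet? row 4 with
        | none => none
        | some s4 =>
          if s4 == "ZCB1-12" then pvALoop rest (t1 ++ [row], t2, t3, t4, t5, t6, t7, t8)
          else if s4 == "ZCB1-13" then pvALoop rest (t1, t2, t3 ++ [row], t4, t5, t6, t7, t8)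
          else if s4 == "ZCB1-14" then pvALoop rest (t1, t2, t3, t4, t5 ++ [row], t6, t7, t8)
          else if s4 == "ZCB1-15" then pvALoop rest (t1, t2, t3, t4, t5, t6, t7 ++ [row], t8)
          else pvALoop rest (t1, t2, t3, t4, t5, t6, t7, t8)
      else if s3 == "40m" then
        match PySem.List.pyGet? row 4 with
        | none => none
        | some s4 =>
          if s4 == "ZCB1-12" then pvALoop rest (t1, t2 ++ [row], t3, t4, t5, t6, t7, t8)
          else if s4 == "ZCB1-13" then pvALoop rest (t1, t2, t3, t4 ++ [row], t5, t6, t7, t8)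
          else if s4 == "ZCB1-14" then pvALoop rest (t1, t2, t3, t4, t5, t6 ++ [row], t7, t8)
          else if s4 == "ZCB1-15" then pvALoop rest (t1, t2, t3, t4, t5, t6, t7, t8 ++ [row])
          else pvALoop rest (t1, t2, t3, t4, t5, t6, t7, t8)
      else pvALoop rest (t1, t2, t3, t4, t5, t6, t7, t8)

def casting_classification (beam_info : List (List String)) : Option (List Int) :=
  if beam_info.length == 0 then none   -- 'pass': falls off the function, returns None
  else
    match pvALoop beam_info ([], [], [], [], [], [], [], []) with
    | none => none
    | some (t1, t2, t3, t4, t5, t6, t7, t8) =>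
      some [(t1.length : Int), (t2.length : Int), (t3.length : Int), (t4.length : Int),
            (t5.length : Int), (t6.length : Int), (t7.length : Int), (t8.length : Int)]

-- ===== PORT B =====
-- B's first stage: keys = [(b[3], b[4]) if b[3] in ('25m','40m') else None for b in beam_info]
def pvBProj : List (List String) → Option (List (Option (String × String)))
  | [] => some []
  | row :: rest =>
    match PySem.List.pyGet? row 3 with
    | none => none
    | some s3 =>
      if s3 == "25m" || s3 == "40m" then
        match PySem.List.pyGet? row 4 with
        | none => none
        | some s4 => (pvBProj rest).map (fun ks => some (s3, s4) :: ks)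
      else (pvBProj rest).map (fun ks => none :: ks)

-- B's second stage: [keys.count((length, btype)) for btype in … for length in ('25m','40m')]
def casting_classification_alt (beam_info : List (List String)) : Option (List Int) :=
  if beam_info.length == 0 then none
  else
    match pvBProj beam_info with
    | none => none
    | some keys =>
      some ((["ZCB1-12", "ZCB1-13", "ZCB1-14", "ZCB1-15"].flatMap fun btype =>
             ["25m", "40m"].map fun length =>
               (PySem.List.count keys (some (length, btype)) : Int)))

-- ===== PRECONDITION & SPEC =====
-- Pre_ is exactly the inputs on which A returns normally: every row either has ≥ 5 entries, or has
-- exactly 4 entries with element 3 neither '25m' nor '40m' (then the short-circuited 'and' never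
-- reads index 4); outside Pre_, both A and B raise IndexError.
def Pre_casting_classification (beam_info : List (List String)) : Prop :=
  ∀ row ∈ beam_info, 5 ≤ row.length ∨
    (row.length = 4 ∧ row.getD 3 "" ≠ "25m" ∧ row.getD 3 "" ≠ "40m")
instance (beam_info : List (List String)) : Decidable (Pre_casting_classification beam_info) := by unfold Pre_casting_classification; infer_instance

def pvWitness_casting_classification : List (List String) :=
  [["a", "b", "c", "25m", "ZCB1-12"], ["a", "b", "c", "40m", "ZCB1-15"]]

def Spec_casting_classification (beam_info : List (List String)) (out : Option (List Int)) : Prop := out = casting_classification_alt beam_info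
instance (beam_info : List (List String)) (out : Option (List Int)) : Decidable (Spec_casting_classification beam_info out) := by unfold Spec_casting_classification; infer_instance

-- ===== CLAIM (what is proved, stated in full; the proofs are below) =====
def Claim_equal_casting_classification : Prop := ∀ (beam_info : List (List String)), Dom_casting_classification beam_info → Pre_casting_classification beam_info → Spec_casting_classification beam_info (casting_classification beam_info)

-- ===== LEMMAS AND PROOFS =====
-- the (length, type) columns of a row, and the key B projects it to (none = other length)
def pvKeyOf (row : List String) : String × String := (row.getD 3 "", row.getD 4 "")
def pvKey? (row : List String) : Option (String × String) :=
  if row.getD 3 "" = "25m" ∨ row.getD 3 "" = "40m" then some (pvKeyOf row) else none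

theorem pvALoop_char (bi : List (List String))
    (h : ∀ row ∈ bi, 5 ≤ row.length ∨
      (row.length = 4 ∧ row.getD 3 "" ≠ "25m" ∧ row.getD 3 "" ≠ "40m")) :
    ∀ t1 t2 t3 t4 t5 t6 t7 t8 : List (List String),
    pvALoop bi (t1, t2, t3, t4, t5, t6, t7, t8) =
      some (t1 ++ bi.filter (fun r => pvKeyOf r = ("25m", "ZCB1-12")),
            t2 ++ bi.filter (fun r => pvKeyOf r = ("40m", "ZCB1-12")),
            t3 ++ bi.filter (fun r => pvKeyOf r = ("25m", "ZCB1-13")),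
            t4 ++ bi.filter (fun r => pvKeyOf r = ("40m", "ZCB1-13")),
            t5 ++ bi.filter (fun r => pvKeyOf r = ("25m", "ZCB1-14")),
            t6 ++ bi.filter (fun r => pvKeyOf r = ("40m", "ZCB1-14")),
            t7 ++ bi.filter (fun r => pvKeyOf r = ("25m", "ZCB1-15")),
            t8 ++ bi.filter (fun r => pvKeyOf r = ("40m", "ZCB1-15"))) := by
  induction bi with
  | nil => intro t1 t2 t3 t4 t5 t6 t7 t8; simp [pvALoop]; rfl
  | cons row rest ih =>
    intro t1 t2 t3 t4 t5 t6 t7 t8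
    have hrest : ∀ r ∈ rest, 5 ≤ r.length ∨
        (r.length = 4 ∧ r.getD 3 "" ≠ "25m" ∧ r.getD 3 "" ≠ "40m") :=
      fun r hr => h r (List.mem_cons_of_mem _ hr)
    rcases h row (by simp) with h5 | ⟨h4, hne25, hne40⟩
    · have h3' : 3 < row.length := by omega
      have h4' : 4 < row.length := by omega
      have e3 : PySem.List.pyGet? row 3 = some row[3] := by
        simpa using PySem.List.pyGet?_ofNat row 3 h3'
      have e4 : PySem.List.pyGet? row 4 = some row[4] := by
        simpa using PySem.List.pyGet?_ofNat row 4 h4'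
      have kv : pvKeyOf row = (row[3], row[4]) := by
        simp [pvKeyOf, List.getElem?_eq_getElem h3', List.getElem?_eq_getElem h4']
      rw [pvALoop, e3]
      simp only [e4]
      split_ifs <;>
        (simp only [beq_iff_eq] at *; rw [ih hrest];
         simp [List.filter_cons, kv, List.append_assoc, *])
    · have h3' : 3 < row.length := by omega
      have e3 : PySem.List.pyGet? row 3 = some row[3] := by
        simpa using PySem.List.pyGet?_ofNat row 3 h3'
      have g3 : row.getD 3 "" = row[3] := by
        simp [List.getD_eq_getElem?_getD, List.getElem?_eq_getElem h3']
      have g4 : row.getD 4 "" = "" := by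
        have : row[4]? = none := by
          rw [List.getElem?_eq_none_iff]; omega
        simp [List.getD_eq_getElem?_getD, this]
      rw [g3] at hne25 hne40
      have kv : pvKeyOf row = (row[3], "") := by unfold pvKeyOf; rw [g3, g4]
      rw [pvALoop, e3]
      simp only [beq_iff_eq, if_neg hne25, if_neg hne40]
      rw [ih hrest]
      simp [kv, List.filter_cons]

theorem pvBProj_char (bi : List (List String))
    (h : ∀ row ∈ bi, 5 ≤ row.length ∨
      (row.length = 4 ∧ row.getD 3 "" ≠ "25m" ∧ row.getD 3 "" ≠ "40m")) :
    pvBProj bi = some (bi.map pvKey?) := by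
  induction bi with
  | nil => simp [pvBProj]
  | cons row rest ih =>
    have hrest : ∀ r ∈ rest, 5 ≤ r.length ∨
        (r.length = 4 ∧ r.getD 3 "" ≠ "25m" ∧ r.getD 3 "" ≠ "40m") :=
      fun r hr => h r (List.mem_cons_of_mem _ hr)
    rcases h row (by simp) with h5 | ⟨h4, hne25, hne40⟩
    · have h3' : 3 < row.length := by omega
      have h4' : 4 < row.length := by omega
      have e3 : PySem.List.pyGet? row 3 = some row[3] := by
        simpa using PySem.List.pyGet?_ofNat row 3 h3'
      have e4 : PySem.List.pyGet? row 4 = some row[4] := by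
        simpa using PySem.List.pyGet?_ofNat row 4 h4'
      have g3 : row.getD 3 "" = row[3] := by
        simp [List.getD_eq_getElem?_getD, List.getElem?_eq_getElem h3']
      have g4 : row.getD 4 "" = row[4] := by
        simp [List.getD_eq_getElem?_getD, List.getElem?_eq_getElem h4']
      rw [pvBProj, e3]
      dsimp only
      by_cases c : row.getD 3 "" = "25m" ∨ row.getD 3 "" = "40m"
      · have cb : (row[3] == "25m" || row[3] == "40m") = true := by
          rcases c with c | c <;> rw [g3] at c <;> simp [c]
        rw [if_pos cb, e4]
        dsimp only
        rw [ih hrest]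
        have hk : pvKey? row = some (row[3], row[4]) := by
          unfold pvKey? pvKeyOf; rw [if_pos c, g3, g4]
        simp [List.map_cons, hk]
      · have c2 : ¬(row[3] = "25m" ∨ row[3] = "40m") := by rw [← g3]; exact c
        have cb : (row[3] == "25m" || row[3] == "40m") = false := by
          simp only [Bool.or_eq_false_iff, beq_eq_false_iff_ne]
          exact not_or.mp c2
        rw [if_neg (by simp [cb]), ih hrest]
        have hk : pvKey? row = none := by unfold pvKey?; exact if_neg c
        simp [List.map_cons, hk]
    · have h3' : 3 < row.length := by omega
      have e3 : PySem.List.pyGet? row 3 = some row[3] := by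
        simpa using PySem.List.pyGet?_ofNat row 3 h3'
      have g3 : row.getD 3 "" = row[3] := by
        simp [List.getD_eq_getElem?_getD, List.getElem?_eq_getElem h3']
      have c : ¬(row.getD 3 "" = "25m" ∨ row.getD 3 "" = "40m") := not_or.mpr ⟨hne25, hne40⟩
      have c2 : ¬(row[3] = "25m" ∨ row[3] = "40m") := by rw [← g3]; exact c
      have cb : (row[3] == "25m" || row[3] == "40m") = false := by
        simp only [Bool.or_eq_false_iff, beq_eq_false_iff_ne]
        exact not_or.mp c2
      rw [pvBProj, e3]
      dsimp only
      rw [if_neg (by simp [cb]), ih hrest]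
      have hk : pvKey? row = none := by unfold pvKey?; exact if_neg c
      simp [List.map_cons, hk]

theorem pvCount_char (bi : List (List String))
    (h : ∀ row ∈ bi, 5 ≤ row.length ∨
      (row.length = 4 ∧ row.getD 3 "" ≠ "25m" ∧ row.getD 3 "" ≠ "40m"))
    (k : String × String) (hk1 : k.1 = "25m" ∨ k.1 = "40m") (hk2 : k.2 ≠ "") :
    (bi.map pvKey?).count (some k) = (bi.filter (fun r => pvKeyOf r = k)).length := by
  induction bi with
  | nil => simp
  | cons row rest ih =>
    have hrest : ∀ r ∈ rest, 5 ≤ r.length ∨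
        (r.length = 4 ∧ r.getD 3 "" ≠ "25m" ∧ r.getD 3 "" ≠ "40m") :=
      fun r hr => h r (List.mem_cons_of_mem _ hr)
    rcases h row (by simp) with h5 | ⟨h4, hne25, hne40⟩
    · by_cases c : row.getD 3 "" = "25m" ∨ row.getD 3 "" = "40m"
      · have hk : pvKey? row = some (pvKeyOf row) := by unfold pvKey?; exact if_pos c
        simp only [List.map_cons, List.filter_cons, hk, List.count_cons, ih hrest]
        by_cases e : pvKeyOf row = k <;> simp [e]
      · have hkne : pvKeyOf row ≠ k := by
          intro e
          apply c
          have e1 : row.getD 3 "" = k.1 := by rw [← e]; rfl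
          rw [e1]; exact hk1
        have hk : pvKey? row = none := by unfold pvKey?; exact if_neg c
        simp [List.map_cons, List.filter_cons, hk, hkne, ih hrest]
    · have g4 : row.getD 4 "" = "" := by
        have h4n : row[4]? = none := by rw [List.getElem?_eq_none_iff]; omega
        simp [List.getD_eq_getElem?_getD, h4n]
      have hkne : pvKeyOf row ≠ k := by
        intro e
        apply hk2
        have e2 : k.2 = row.getD 4 "" := by rw [← e]; rfl
        rw [e2, g4]
      have hk : pvKey? row = none := by
        unfold pvKey?; exact if_neg (not_or.mpr ⟨hne25, hne40⟩)
      simp [List.map_cons, List.filter_cons, hk, hkne, ih hrest]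

-- ===== VERDICT (by name: the statement is the Claim_ definition above) =====
theorem casting_classification_spec : Claim_equal_casting_classification := by
  intro bi _ hpre
  unfold Spec_casting_classification casting_classification casting_classification_alt
  by_cases hbi : bi.length = 0
  · simp [hbi]
  · rw [pvALoop_char bi hpre, pvBProj_char bi hpre]
    simp [hbi, PySem.List.count_eq,
      pvCount_char bi hpre ("25m", "ZCB1-12") (by simp) (by decide),
      pvCount_char bi hpre ("40m", "ZCB1-12") (by simp) (by decide),
      pvCount_char bi hpre ("25m", "ZCB1-13") (by simp) (by decide),
      pvCount_char bi hpre ("40m", "ZCB1-13") (by simp) (by decide),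
      pvCount_char bi hpre ("25m", "ZCB1-14") (by simp) (by decide),
      pvCount_char bi hpre ("40m", "ZCB1-14") (by simp) (by decide),
      pvCount_char bi hpre ("25m", "ZCB1-15") (by simp) (by decide),
      pvCount_char bi hpre ("40m", "ZCB1-15") (by simp) (by decide)]
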